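-- pv_equiv track=rewrite | github.com/Vectorredz/Folder | Classes_1/Practice_5/cs12232prac05c.py | generate_histogram
-- ===== SOURCE A (Python) =====
-- from typing import Sequence
--
-- def generate_histogram(data: Sequence[int]):
--     for i in data:
--         if i < 0:
--             raise ValueError
--     counts = [0]*10
--     for num in data:
--         counts[int(str(abs(num))[0])] += 1
--
--     cmax = max(counts)
--
--     histogram = []
--     for i in range(20, -1, -1):
--         row = []
--         for j in range(10):
--             if i <= 20 * counts[j] // cmax:
--                 row.append("##")
--             else:
--                 row.append("..")
--         histogram.append(".".join(row))
--     return histogram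
-- ===== SOURCE B (Python) =====
-- def generate_histogram(data):
--     for i in data:
--         if i < 0:
--             raise ValueError
--     counts = [0] * 10
--     for num in data:
--         counts[int(str(num)[0])] += 1
--     cmax = max(counts)
--     heights = [20 * c // cmax for c in counts]
--     columns = [["##" if k <= h else ".." for k in range(21)] for h in heights]
--     grid = [[col[k] for col in columns] for k in range(21)]  # transpose of the columns
--     return [".".join(row) for row in reversed(grid)]
-- ===== Notes on version B (the rewrite author's own statement) =====
-- stated objective: alternative
-- what changed: B precomputes the ten bar heights once, builds each digit's 21-cell column, and produces the output by transposing the columns and reading the transposed grid top-down, instead of A's row-major double loop that recomputes 20*counts[j]//cmax in every grid cell.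
import Mathlib
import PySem

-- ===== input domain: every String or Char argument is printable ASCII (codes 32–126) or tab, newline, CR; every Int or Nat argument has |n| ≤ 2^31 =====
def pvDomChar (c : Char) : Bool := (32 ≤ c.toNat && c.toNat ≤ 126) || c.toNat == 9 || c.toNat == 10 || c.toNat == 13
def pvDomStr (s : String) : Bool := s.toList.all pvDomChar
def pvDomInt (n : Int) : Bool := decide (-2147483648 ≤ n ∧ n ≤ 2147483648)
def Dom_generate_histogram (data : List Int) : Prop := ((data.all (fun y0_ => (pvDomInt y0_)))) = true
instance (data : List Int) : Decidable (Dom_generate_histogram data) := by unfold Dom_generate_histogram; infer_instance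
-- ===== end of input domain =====

-- B builds the ten bar columns from precomputed heights and transposes them, instead of
-- A's row-major double loop; same cost (objective: alternative decomposition).

-- ===== PORT A =====
-- loop body: counts[int(str(abs(num))[0])] += 1  (index always in 0..9, so pySetD/pyGetD are exact)
def pvBumpA (counts : List Int) (num : Int) : List Int :=
  let d : Int := (PySem.Int.ofChars? [(PySem.Str.pyGet? (PySem.Int.toStr |num|) 0).getD ' ']).getD 0
  PySem.List.pySetD counts d (PySem.List.pyGetD counts d 0 + 1)

-- the 'for i in data: if i < 0: raise ValueError' loop and the //0 on empty data are excluded by Pre_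
def generate_histogram (data : List Int) : List String :=
  let counts : List Int := data.foldl pvBumpA (List.replicate 10 0)
  let cmax : Int := (PySem.List.max? counts (fun x => x)).getD 0
  (PySem.List.pyRange 20 (-1) (-1)).map (fun i =>
    PySem.Str.join "." ((PySem.List.pyRange 0 10 1).map (fun j =>
      if i ≤ PySem.Int.floordiv (20 * PySem.List.pyGetD counts j 0) cmax then "##" else "..")))

-- ===== PORT B =====
-- loop body: counts[int(str(num)[0])] += 1  (B checked negativity first, so no abs)
def pvBumpB (counts : List Int) (num : Int) : List Int :=
  let d : Int := (PySem.Int.ofChars? [(PySem.Str.pyGet? (PySem.Int.toStr num) 0).getD ' ']).getD 0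
  PySem.List.pySetD counts d (PySem.List.pyGetD counts d 0 + 1)

def generate_histogram_alt (data : List Int) : List String :=
  let counts : List Int := data.foldl pvBumpB (List.replicate 10 0)
  let cmax : Int := (PySem.List.max? counts (fun x => x)).getD 0
  let heights : List Int := counts.map (fun c => PySem.Int.floordiv (20 * c) cmax)
  let columns : List (List String) := heights.map (fun h =>
    (PySem.List.pyRange 0 21 1).map (fun k => if k ≤ h then "##" else ".."))
  let grid : List (List String) := (PySem.List.pyRange 0 21 1).map (fun k =>
    columns.map (fun col => PySem.List.pyGetD col k ""))
  grid.reverse.map (fun row => PySem.Str.join "." row)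

-- ===== PRECONDITION & SPEC =====
-- Pre_ excludes exactly the inputs where A raises: a negative element (explicit ValueError)
-- and the empty list (max(counts)=0, ZeroDivisionError in 20*counts[j]//cmax).
def Pre_generate_histogram (data : List Int) : Prop := data ≠ [] ∧ ∀ x ∈ data, 0 ≤ x
instance (data : List Int) : Decidable (Pre_generate_histogram data) := by unfold Pre_generate_histogram; infer_instance
def pvWitness_generate_histogram : List Int := ([3, 15, 3])

def Spec_generate_histogram (data : List Int) (out : List String) : Prop := out = generate_histogram_alt data
instance (data : List Int) (out : List String) : Decidable (Spec_generate_histogram data out) := by unfold Spec_generate_histogram; infer_instance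

-- ===== CLAIM (what is proved, stated in full; the proofs are below) =====
def Claim_equal_generate_histogram : Prop := ∀ (data : List Int), Dom_generate_histogram data → Pre_generate_histogram data → Spec_generate_histogram data (generate_histogram data)

-- ===== LEMMAS AND PROOFS =====

-- A counts leading digits of str(abs(num)), B of str(num); identical when every element is ≥ 0.
lemma pv_bump_eq (counts : List Int) (num : Int) (h : 0 ≤ num) :
    pvBumpA counts num = pvBumpB counts num := by
  unfold pvBumpA pvBumpB
  rw [abs_of_nonneg h]

lemma pv_counts_eq (data : List Int) (h : ∀ x ∈ data, 0 ≤ x) :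
    data.foldl pvBumpA (List.replicate 10 0) = data.foldl pvBumpB (List.replicate 10 0) :=
  PySem.List.foldl_congr_mem data pvBumpA pvBumpB _ (fun acc x hx => pv_bump_eq acc x (h x hx))

lemma pv_counts_len (data : List Int) :
    (data.foldl pvBumpB (List.replicate 10 0)).length = 10 := by
  have key : ∀ (l : List Int) (acc : List Int), (l.foldl pvBumpB acc).length = acc.length := by
    intro l
    induction l with
    | nil => intro acc; rfl
    | cons x t ih =>
      intro acc
      rw [List.foldl_cons, ih]
      simp [pvBumpB, PySem.List.length_pySetD]
  rw [key]
  rfl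

lemma pv_len10 (l : List Int) (h : l.length = 10) :
    ∃ a b c d e f g p q r, l = [a, b, c, d, e, f, g, p, q, r] := by
  match l, h with
  | [a, b, c, d, e, f, g, p, q, r], _ => exact ⟨a, b, c, d, e, f, g, p, q, r, rfl⟩

-- the rendering stage agrees for any length-10 counts list: both sides reduce to the same
-- 21×10 grid of cells 'if i ≤ 20*c_j//cmax then "##" else ".."' read for i = 20..0
set_option maxHeartbeats 2000000 in
lemma pv_render_eq (a b c d e f g p q r : Int) :
    (let counts : List Int := [a, b, c, d, e, f, g, p, q, r]
     let cmax : Int := (PySem.List.max? counts (fun x => x)).getD 0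
     (PySem.List.pyRange 20 (-1) (-1)).map (fun i =>
       PySem.Str.join "." ((PySem.List.pyRange 0 10 1).map (fun j =>
         if i ≤ PySem.Int.floordiv (20 * PySem.List.pyGetD counts j 0) cmax then "##" else ".."))))
    = (let counts : List Int := [a, b, c, d, e, f, g, p, q, r]
       let cmax : Int := (PySem.List.max? counts (fun x => x)).getD 0
       let heights : List Int := counts.map (fun cc => PySem.Int.floordiv (20 * cc) cmax)
       let columns : List (List String) := heights.map (fun h =>
         (PySem.List.pyRange 0 21 1).map (fun k => if k ≤ h then "##" else ".."))
       let grid : List (List String) := (PySem.List.pyRange 0 21 1).map (fun k =>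
         columns.map (fun col => PySem.List.pyGetD col k ""))
       grid.reverse.map (fun row => PySem.Str.join "." row)) := rfl

-- ===== VERDICT (by name: the statement is the Claim_ definition above) =====
theorem generate_histogram_spec : Claim_equal_generate_histogram := by
  intro data _ hpre
  unfold Spec_generate_histogram generate_histogram generate_histogram_alt
  rw [pv_counts_eq data hpre.2]
  obtain ⟨a, b, c, d, e, f, g, p, q, r, hC⟩ := pv_len10 _ (pv_counts_len data)
  rw [hC]
  exact pv_render_eq a b c d e f g p q r
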